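-- pv_equiv track=rewrite | github.com/andresfleao-11/reavaliacao-implantacao | backend/app/services/search_provider.py | _is_foreign_domain
-- ===== SOURCE A (Python) =====
-- FOREIGN_DOMAIN_PATTERNS = {
--     ".com",      # Generic .com (but not .com.br)
--     ".net",
--     ".org",
--     ".us",
--     ".uk",
--     ".de",
--     ".fr",
--     ".es",
--     ".it",
--     ".cn",
--     ".jp",
--     ".co.uk",
--     ".eu",
-- }
--
-- ALLOWED_FOREIGN_DOMAINS = {
--     "www.lenovo.com",
--     "lenovo.com",
--     "www.dell.com",
--     "dell.com",
--     "www.hp.com",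
--     "hp.com",
--     "www.samsung.com",
--     "samsung.com",
--     "www.lg.com",
--     "lg.com",
--     "www.apple.com",
--     "apple.com",
--     "www.asus.com",
--     "asus.com",
--     "www.acer.com",
--     "acer.com",
-- }
--
-- def _is_foreign_domain(domain: str) -> bool:
--     """Check if domain is from a foreign country (not Brazilian)"""
--     if not domain:
--         return False
--
--     domain_lower = domain.lower()
--
--     # Allow Brazilian domains
--     if domain_lower.endswith(".com.br") or domain_lower.endswith(".br"):
--         return False
--
--     # Allow specific foreign domains (major manufacturers that sell in Brazil)
--     if domain_lower in ALLOWED_FOREIGN_DOMAINS: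
--         return False
--
--     # Check for foreign TLDs
--     for pattern in FOREIGN_DOMAIN_PATTERNS:
--         # Make sure we're checking the TLD, not part of the domain name
--         if domain_lower.endswith(pattern) and not domain_lower.endswith(".com.br"):
--             return True
--
--     return False
-- ===== SOURCE B (Python) =====
-- FOREIGN_DOMAIN_PATTERNS = {
--     ".com", ".net", ".org", ".us", ".uk", ".de", ".fr",
--     ".es", ".it", ".cn", ".jp", ".co.uk", ".eu",
-- }
--
-- ALLOWED_FOREIGN_DOMAINS = {
--     "www.lenovo.com", "lenovo.com", "www.dell.com", "dell.com",
--     "www.hp.com", "hp.com", "www.samsung.com", "samsung.com",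
--     "www.lg.com", "lg.com", "www.apple.com", "apple.com",
--     "www.asus.com", "asus.com", "www.acer.com", "acer.com",
-- }
--
-- def _is_foreign_domain(domain: str) -> bool:
--     """Check if domain is from a foreign country (not Brazilian)"""
--     if not domain:
--         return False
--
--     domain_lower = domain.lower()
--
--     if domain_lower.endswith(".com.br") or domain_lower.endswith(".br"):
--         return False
--
--     if domain_lower in ALLOWED_FOREIGN_DOMAINS:
--         return False
--
--     # every pattern is anchored at a dot, so collect the dot-anchored
--     # suffixes of the domain and intersect with the pattern set
--     suffixes = {domain_lower[i:] for i, c in enumerate(domain_lower) if c == "."}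
--     return not suffixes.isdisjoint(FOREIGN_DOMAIN_PATTERNS)
-- ===== Notes on version B (the rewrite author's own statement) =====
-- stated objective: idiomatic
-- what changed: Instead of scanning the fixed TLD pattern set with endswith, B collects the domain's dot-anchored suffixes once via enumerate and returns whether that suffix set intersects FOREIGN_DOMAIN_PATTERNS (the redundant inner .com.br re-check disappears).
import Mathlib
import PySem

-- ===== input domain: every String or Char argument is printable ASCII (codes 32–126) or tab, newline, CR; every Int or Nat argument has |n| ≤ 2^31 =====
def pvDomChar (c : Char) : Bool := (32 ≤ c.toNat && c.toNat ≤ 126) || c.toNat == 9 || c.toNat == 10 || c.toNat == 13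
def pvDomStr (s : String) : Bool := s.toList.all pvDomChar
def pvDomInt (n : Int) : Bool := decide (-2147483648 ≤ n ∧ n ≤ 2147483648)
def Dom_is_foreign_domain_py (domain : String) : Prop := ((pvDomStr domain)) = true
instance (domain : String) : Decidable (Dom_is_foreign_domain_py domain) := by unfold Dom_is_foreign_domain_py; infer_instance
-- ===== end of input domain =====

-- B replaces A's scan of the fixed pattern set with endswith by collecting the
-- domain's dot-anchored suffixes once and intersecting them with the pattern set (idiomatic).

def pvForeignPatterns : List String :=
  [".com", ".net", ".org", ".us", ".uk", ".de", ".fr", ".es", ".it", ".cn", ".jp", ".co.uk", ".eu"]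

def pvAllowedForeign : List String :=
  ["www.lenovo.com", "lenovo.com", "www.dell.com", "dell.com",
   "www.hp.com", "hp.com", "www.samsung.com", "samsung.com",
   "www.lg.com", "lg.com", "www.apple.com", "apple.com",
   "www.asus.com", "asus.com", "www.acer.com", "acer.com"]

-- ===== PORT A =====
def is_foreign_domain_py (domain : String) : Bool :=
  if domain = "" then false
  else
    let dl := PySem.Str.lower domain
    if PySem.Str.endswith dl ".com.br" || PySem.Str.endswith dl ".br" then false
    else if pvAllowedForeign.contains dl then false
    else pvForeignPatterns.any (fun p =>
      PySem.Str.endswith dl p && !(PySem.Str.endswith dl ".com.br"))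

-- ===== PORT B =====
-- the suffixes of cl starting at each '.' (Source B's set comprehension over enumerate)
def pvDotSuffixes (cl : List Char) : List (List Char) :=
  (PySem.List.enumerate cl 0).filterMap
    (fun p => if p.2 = '.' then some (cl.drop p.1.toNat) else none)

def is_foreign_domain_py_alt (domain : String) : Bool :=
  if domain = "" then false
  else
    let dl := PySem.Str.lower domain
    if PySem.Str.endswith dl ".com.br" || PySem.Str.endswith dl ".br" then false
    else if pvAllowedForeign.contains dl then false
    else (pvDotSuffixes dl.toList).any
      (fun s => (pvForeignPatterns.map String.toList).contains s)

-- ===== PRECONDITION & SPEC =====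
def Spec_is_foreign_domain_py (domain : String) (out : Bool) : Prop := out = is_foreign_domain_py_alt domain
instance (domain : String) (out : Bool) : Decidable (Spec_is_foreign_domain_py domain out) := by unfold Spec_is_foreign_domain_py; infer_instance

-- ===== CLAIM (what is proved, stated in full; the proofs are below) =====
def Claim_equal_is_foreign_domain_py : Prop := ∀ (domain : String), Dom_is_foreign_domain_py domain → Spec_is_foreign_domain_py domain (is_foreign_domain_py domain)

-- ===== LEMMAS AND PROOFS =====

theorem mem_pvDotSuffixes (cl s : List Char) :
    s ∈ pvDotSuffixes cl ↔ ∃ k : Nat, ∃ h : k < cl.length, cl[k] = '.' ∧ s = cl.drop k := by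
  unfold pvDotSuffixes
  simp only [List.mem_filterMap, PySem.List.mem_enumerate_iff]
  constructor
  · rintro ⟨p, ⟨k, hk, rfl⟩, hf⟩
    simp only at hf
    split_ifs at hf with hdot
    · refine ⟨k, hk, hdot, ?_⟩
      have : ((0 : Int) + (k : Int)).toNat = k := by omega
      simp at hf
      exact hf.symm
  · rintro ⟨k, hk, hdot, rfl⟩
    refine ⟨((0 : Int) + (k : Int), cl[k]), ⟨k, hk, rfl⟩, ?_⟩
    have : ((0 : Int) + (k : Int)).toNat = k := by omega
    simp [hdot]

theorem dot_suffix_mem (cl t : List Char) (h : ('.' :: t) <:+ cl) :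
    ('.' :: t) ∈ pvDotSuffixes cl := by
  obtain ⟨pre, rfl⟩ := h
  rw [mem_pvDotSuffixes]
  refine ⟨pre.length, by simp, ?_, ?_⟩
  · have : (pre ++ '.' :: t)[pre.length]? = some '.' := by
      rw [List.getElem?_append_right (le_refl _)]
      simp
    simpa [List.getElem?_eq_getElem] using this
  · rw [List.drop_left]

theorem pvDotSuffixes_suffix (cl s : List Char) (h : s ∈ pvDotSuffixes cl) : s <:+ cl := by
  rw [mem_pvDotSuffixes] at h
  obtain ⟨k, _, _, rfl⟩ := h
  exact List.drop_suffix k cl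

theorem pvPatterns_head : ∀ p ∈ pvForeignPatterns, p.toList.head? = some '.' := by decide

theorem any_endswith_eq (cl : List Char) :
    (pvForeignPatterns.any (fun p => PySem.Chars.endswith cl p.toList))
      = ((pvDotSuffixes cl).any (fun s => (pvForeignPatterns.map String.toList).contains s)) := by
  rw [Bool.eq_iff_iff]
  simp only [List.any_eq_true, PySem.Chars.endswith_iff, List.contains_iff_mem, List.mem_map]
  constructor
  · rintro ⟨p, hp, hsuf⟩
    refine ⟨p.toList, ?_, p, hp, rfl⟩
    have hd := pvPatterns_head p hp
    cases hpl : p.toList with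
    | nil => rw [hpl] at hd; simp at hd
    | cons a t =>
      rw [hpl] at hd hsuf
      simp only [List.head?_cons, Option.some.injEq] at hd
      subst hd
      exact dot_suffix_mem cl t hsuf
  · rintro ⟨s, hs, p, hp, rfl⟩
    exact ⟨p, hp, pvDotSuffixes_suffix cl _ hs⟩

-- ===== VERDICT (by name: the statement is the Claim_ definition above) =====
theorem is_foreign_domain_py_spec : Claim_equal_is_foreign_domain_py := by
  intro domain _
  unfold Spec_is_foreign_domain_py
  by_cases h0 : domain = ""
  · simp [is_foreign_domain_py, is_foreign_domain_py_alt, h0]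
  · cases hc : PySem.Chars.endswith (PySem.Chars.lower domain.toList) ['.', 'c', 'o', 'm', '.', 'b', 'r'] with
    | true => simp [is_foreign_domain_py, is_foreign_domain_py_alt, h0, hc]
    | false =>
        have key := any_endswith_eq (PySem.Chars.lower domain.toList)
        simp only [List.contains_iff_mem, List.mem_map] at key
        simp [is_foreign_domain_py, is_foreign_domain_py_alt, h0, hc, key]
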